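-- pv_equiv track=rewrite | github.com/WuzenLiz/Code | Codeingame/py/Virust.py | SI_can_go_to_exit_gateways
-- ===== SOURCE A (Python) =====
-- from collections import defaultdict, deque
--
-- def SI_can_go_to_exit_gateways(network, SI, exit_gateways):
--     queue = deque([SI])
--     visited = set()
--     visited.add(SI)
--
--     while queue:
--         current_node = queue.popleft()
--
--         for neighbor in network[current_node]:
--             if neighbor not in visited:
--                 if neighbor in exit_gateways:
--                     return True
--                 queue.append(neighbor)
--                 visited.add(neighbor)
--
--     return False
-- ===== SOURCE B (Python) =====
-- def SI_can_go_to_exit_gateways(network, SI, exit_gateways):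
--     visited = {SI}
--
--     def dfs(node):
--         for neighbor in network[node]:
--             if neighbor not in visited:
--                 if neighbor in exit_gateways:
--                     return True
--                 visited.add(neighbor)
--                 if dfs(neighbor):
--                     return True
--         return False
--
--     return dfs(SI)
-- ===== Notes on version B (the rewrite author's own statement) =====
-- stated objective: alternative
-- what changed: Replaced the iterative queue-based BFS by a recursive depth-first search that threads a shared visited set; Pre_ excludes inputs where either traversal looks up a node missing from the network dict (KeyError), since early exit makes A and B hit such nodes in different orders.
-- outside the precondition, e.g. on SI_can_go_to_exit_gateways({0: [1], 1: [9, 2]}, 0, {2}): A returns True, B raises KeyError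
import Mathlib
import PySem

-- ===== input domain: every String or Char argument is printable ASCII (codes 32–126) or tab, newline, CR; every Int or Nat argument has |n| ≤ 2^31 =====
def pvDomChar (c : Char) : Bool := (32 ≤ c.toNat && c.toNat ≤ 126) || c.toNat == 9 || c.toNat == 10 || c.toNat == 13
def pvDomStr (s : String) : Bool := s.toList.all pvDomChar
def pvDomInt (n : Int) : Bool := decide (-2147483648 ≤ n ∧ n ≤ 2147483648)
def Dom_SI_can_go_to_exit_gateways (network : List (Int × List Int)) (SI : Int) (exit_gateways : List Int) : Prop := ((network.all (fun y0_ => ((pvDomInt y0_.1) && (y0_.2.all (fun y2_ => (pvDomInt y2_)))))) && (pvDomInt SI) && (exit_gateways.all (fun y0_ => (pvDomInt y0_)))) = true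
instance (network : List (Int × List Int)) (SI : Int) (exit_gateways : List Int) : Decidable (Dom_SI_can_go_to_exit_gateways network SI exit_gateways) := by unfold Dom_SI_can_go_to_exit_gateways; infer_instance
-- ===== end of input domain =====

-- B replaces A's iterative queue-based BFS by a recursive depth-first search
-- threading a shared visited set (alternative decomposition, similar cost);
-- the two ports agree on every input, and the two Pythons on every input of
-- Pre_ (outside it one or both raise KeyError).


-- ===== PORT A =====
-- fuel bound used by both ports as a totality guard (Python's loops need none):
-- 2 + total number of neighbour entries bounds the number of iterations / depth.
def pvFuel (network : List (Int × List Int)) : Nat :=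
  (network.map (fun p => p.2.length)).sum + 2

-- `for neighbor in network[current_node]: …` body; `none` = the `return True` fired.
def bfsNbrs (exit_gateways : List Int) :
    List Int → List Int → PySem.Set Int → Option (List Int × PySem.Set Int)
  | [], queue, visited => some (queue, visited)
  | v :: rest, queue, visited =>
      if PySem.Set.contains visited v then bfsNbrs exit_gateways rest queue visited
      else if exit_gateways.contains v then none
      else bfsNbrs exit_gateways rest (queue ++ [v]) (PySem.Set.add visited v)

-- `while queue:` loop (fuel only guards totality). On a missing key Python A raises
-- KeyError and returns no value; there the port reads `[]` and keeps looping (nothing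
-- about Python A is claimed or compared on such inputs).
def bfsLoop (network : List (Int × List Int)) (exit_gateways : List Int) :
    Nat → List Int → PySem.Set Int → Bool
  | 0, _, _ => false
  | _ + 1, [], _ => false
  | fuel + 1, current :: queue, visited =>
      match bfsNbrs exit_gateways (PySem.Dict.getD (PySem.Dict.mk network) current [])
          queue visited with
      | none => true
      | some (queue', visited') => bfsLoop network exit_gateways fuel queue' visited'

def SI_can_go_to_exit_gateways (network : List (Int × List Int)) (SI : Int) (exit_gateways : List Int) : Bool :=
  bfsLoop network exit_gateways (pvFuel network) [SI] (PySem.Set.add PySem.Set.empty SI)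

-- ===== PORT B =====
-- `def dfs(node): for neighbor in network[node]: …` with `dfs(node)` inlined as the
-- loop over its neighbour list; the mutated `visited` set is threaded through the
-- result. Fuel only guards totality (each descent grows `visited` first, so the
-- depth is bounded); a missing key raises KeyError in Python B — outside Pre_;
-- the port reads `[]` there.
def dfsN (network : List (Int × List Int)) (gw : List Int) :
    Nat → List Int → PySem.Set Int → Bool × PySem.Set Int
  | _, [], visited => (false, visited)
  | fuel, v :: rest, visited =>
      if PySem.Set.contains visited v then dfsN network gw fuel rest visited
      else if gw.contains v then (true, visited)
      else
        match fuel with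
        | 0 => (false, visited)
        | f + 1 =>
            match dfsN network gw f (PySem.Dict.getD (PySem.Dict.mk network) v [])
                (PySem.Set.add visited v) with
            | (true, t) => (true, t)
            | (false, t) => dfsN network gw (f + 1) rest t
termination_by fuel ns _ => (fuel, ns.length)

def SI_can_go_to_exit_gateways_alt (network : List (Int × List Int)) (SI : Int) (exit_gateways : List Int) : Bool :=
  (dfsN network exit_gateways (pvFuel network)
    (PySem.Dict.getD (PySem.Dict.mk network) SI [])
    (PySem.Set.add PySem.Set.empty SI)).1

-- ===== PRECONDITION & SPEC =====
-- one saturation step of the transitive closure: add every non-gateway neighbour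
-- of a node already in S
def pvCloStep (network : List (Int × List Int)) (exit_gateways : List Int)
    (S : List Int) : List Int :=
  PySem.Set.update S (network.flatMap
    (fun p => if p.1 ∈ S then p.2.filter (fun v => !(exit_gateways.contains v)) else []))

-- the set of nodes reachable from SI through non-gateway nodes (a fixpoint is
-- reached after at most one step per listed neighbour)
def pvCloSet (network : List (Int × List Int)) (exit_gateways : List Int) (SI : Int) : List Int :=
  (pvCloStep network exit_gateways)^[(network.map (fun p => p.2.length)).sum + 1] [SI]

-- Both Pythons raise KeyError on a lookup of a node that is not a key of `network`
-- (A when its BFS pops it, B when its DFS descends into it, so exactly which inputs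
-- raise depends on each one's visiting order). Pre_ is the natural KeyError-free
-- domain: SI is a key and every node reachable from SI through non-gateway nodes is
-- a key, so no lookup of either version can miss. It thereby also excludes some
-- inputs on which A happens to return True just before popping a dangling node.
def Pre_SI_can_go_to_exit_gateways (network : List (Int × List Int)) (SI : Int) (exit_gateways : List Int) : Prop :=
  SI ∈ network.map Prod.fst ∧
    ∀ u ∈ pvCloSet network exit_gateways SI, u ∈ network.map Prod.fst
instance (network : List (Int × List Int)) (SI : Int) (exit_gateways : List Int) : Decidable (Pre_SI_can_go_to_exit_gateways network SI exit_gateways) := by unfold Pre_SI_can_go_to_exit_gateways; infer_instance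

def pvWitness_SI_can_go_to_exit_gateways : (List (Int × List Int)) × Int × List Int :=
  ([(0, [1]), (1, [])], 0, [1])

def Spec_SI_can_go_to_exit_gateways (network : List (Int × List Int)) (SI : Int) (exit_gateways : List Int) (out : Bool) : Prop := out = SI_can_go_to_exit_gateways_alt network SI exit_gateways
instance (network : List (Int × List Int)) (SI : Int) (exit_gateways : List Int) (out : Bool) : Decidable (Spec_SI_can_go_to_exit_gateways network SI exit_gateways out) := by unfold Spec_SI_can_go_to_exit_gateways; infer_instance

-- ===== CLAIM (what is proved, stated in full; the proofs are below) =====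
def Claim_equal_SI_can_go_to_exit_gateways : Prop := ∀ (network : List (Int × List Int)) (SI : Int) (exit_gateways : List Int), Dom_SI_can_go_to_exit_gateways network SI exit_gateways → Pre_SI_can_go_to_exit_gateways network SI exit_gateways → Spec_SI_can_go_to_exit_gateways network SI exit_gateways (SI_can_go_to_exit_gateways network SI exit_gateways)

-- ===== LEMMAS AND PROOFS =====

-- adjacency of a node: its (first-match) entry in the dict, `[]` if absent
def pvAdj (network : List (Int × List Int)) (u : Int) : List Int :=
  PySem.Dict.getD (PySem.Dict.mk network) u []

-- the pool every visited node lives in (for the fuel bound)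
def pvPool (network : List (Int × List Int)) (SI : Int) : List Int :=
  SI :: (network.map Prod.snd).flatten

-- nodes reachable from SI along edges whose target is not a gateway
inductive pvReach (network : List (Int × List Int)) (gw : List Int) (SI : Int) : Int → Prop
  | base : pvReach network gw SI SI
  | step {u v : Int} : pvReach network gw SI u → v ∈ pvAdj network u → v ∉ gw →
      pvReach network gw SI v

-- "A can answer True": some reachable node has a gateway neighbour other than SI
-- (a gateway equal to SI sits in `visited` from the start and never counts)
def pvGoal (network : List (Int × List Int)) (gw : List Int) (SI : Int) : Prop :=
  ∃ u, pvReach network gw SI u ∧ ∃ v ∈ pvAdj network u, v ∈ gw ∧ v ≠ SI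

lemma pvLength_le_pool (s t : List Int) (h : s.Nodup) (hs : ∀ x ∈ s, x ∈ t) :
    s.length ≤ t.length := by
  calc s.length = s.toFinset.card := (List.toFinset_card_of_nodup h).symm
    _ ≤ t.toFinset.card := Finset.card_le_card (fun x hx => List.mem_toFinset.2 (hs x (List.mem_toFinset.1 hx)))
    _ ≤ t.length := t.toFinset_card_le

lemma pvAdj_mem_flatten (network : List (Int × List Int)) (u v : Int)
    (hv : v ∈ pvAdj network u) : v ∈ (network.map Prod.snd).flatten := by
  unfold pvAdj at hv
  rw [PySem.Dict.getD_eq_get?_getD] at hv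
  cases hg : PySem.Dict.get? (PySem.Dict.mk network) u with
  | none => rw [hg] at hv; simp at hv
  | some ns =>
      rw [hg] at hv
      have hmem : (u, ns) ∈ network := PySem.Dict.mem_items_of_get?_eq_some _ hg
      exact List.mem_flatten.2 ⟨ns, List.mem_map.2 ⟨(u, ns), hmem, rfl⟩, hv⟩

-- spec of the inner neighbour loop of A
lemma bfsNbrs_spec (gw : List Int) :
    ∀ (ns q s : List Int), s.Nodup →
      (bfsNbrs gw ns q s = none ↔ ∃ v ∈ ns, v ∉ s ∧ v ∈ gw) ∧
      (∀ q' s', bfsNbrs gw ns q s = some (q', s') →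
        ∃ d, q' = q ++ d ∧ s' = s ++ d ∧ s'.Nodup ∧
          (∀ v ∈ d, v ∈ ns ∧ v ∉ gw ∧ v ∉ s) ∧
          (∀ v ∈ ns, v ∉ gw → v ∈ s')) := by
  intro ns
  induction ns with
  | nil =>
      intro q s hnd
      refine ⟨by simp [bfsNbrs], ?_⟩
      intro q' s' h
      simp only [bfsNbrs, Option.some.injEq, Prod.mk.injEq] at h
      exact ⟨[], by simp [← h.1], by simp [← h.2], by simpa [← h.2] using hnd,
        by simp, by simp⟩
  | cons v rest ih =>
      intro q s hnd
      by_cases hvs : v ∈ s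
      · have hc : PySem.Set.contains s v = true := (PySem.Set.contains_iff _ _).2 hvs
        have heq : bfsNbrs gw (v :: rest) q s = bfsNbrs gw rest q s := by
          simp only [bfsNbrs, hc, if_true]
        rcases ih q s hnd with ⟨h1, h2⟩
        refine ⟨?_, ?_⟩
        · rw [heq, h1]
          constructor
          · rintro ⟨w, hw, hws, hwg⟩; exact ⟨w, List.mem_cons_of_mem _ hw, hws, hwg⟩
          · rintro ⟨w, hw, hws, hwg⟩
            rcases List.mem_cons.1 hw with rfl | hw
            · exact absurd hvs hws
            · exact ⟨w, hw, hws, hwg⟩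
        · intro q' s' h
          rcases h2 q' s' (heq ▸ h) with ⟨d, hq', hs', hnd', hd, hcl⟩
          refine ⟨d, hq', hs', hnd', ?_, ?_⟩
          · intro w hw; rcases hd w hw with ⟨h1', h2', h3'⟩
            exact ⟨List.mem_cons_of_mem _ h1', h2', h3'⟩
          · intro w hw hwg
            rcases List.mem_cons.1 hw with rfl | hw
            · rw [hs']; exact List.mem_append_left _ hvs
            · exact hcl w hw hwg
      · have hc : PySem.Set.contains s v = false := by
          rw [Bool.eq_false_iff]
          intro hcc; exact hvs ((PySem.Set.contains_iff _ _).1 hcc)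
        by_cases hvg : v ∈ gw
        · have hcg : gw.contains v = true := List.contains_iff_mem.2 hvg
          have heq : bfsNbrs gw (v :: rest) q s = none := by
            simp only [bfsNbrs, hc, hcg, Bool.false_eq_true, if_false, if_true]
          refine ⟨?_, ?_⟩
          · rw [heq]
            exact ⟨fun _ => ⟨v, List.mem_cons_self, hvs, hvg⟩, fun _ => rfl⟩
          · intro q' s' h; rw [heq] at h; cases h
        · have hcg : gw.contains v = false := by
            rw [Bool.eq_false_iff]
            intro hcc; exact hvg (List.contains_iff_mem.1 hcc)
          have heq : bfsNbrs gw (v :: rest) q s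
              = bfsNbrs gw rest (q ++ [v]) (s ++ [v]) := by
            simp only [bfsNbrs, hc, hcg, Bool.false_eq_true, if_false]
            rw [PySem.Set.add_of_not_mem hvs]
          have hnd2 : (s ++ [v]).Nodup := by
            exact hnd.append (List.nodup_singleton _)
              (fun a ha hav => hvs ((List.mem_singleton.1 hav) ▸ ha))
          rcases ih (q ++ [v]) (s ++ [v]) hnd2 with ⟨h1, h2⟩
          refine ⟨?_, ?_⟩
          · rw [heq, h1]
            constructor
            · rintro ⟨w, hw, hws, hwg⟩
              refine ⟨w, List.mem_cons_of_mem _ hw, fun hmem => hws (List.mem_append_left _ hmem), hwg⟩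
            · rintro ⟨w, hw, hws, hwg⟩
              rcases List.mem_cons.1 hw with rfl | hw
              · exact absurd hwg hvg
              · refine ⟨w, hw, ?_, hwg⟩
                intro hmem
                rcases List.mem_append.1 hmem with h | h
                · exact hws h
                · rcases List.mem_singleton.1 h with rfl; exact hvg hwg
          · intro q' s' h
            rcases h2 q' s' (heq ▸ h) with ⟨d, hq', hs', hnd', hd, hcl⟩
            refine ⟨v :: d, by simpa using hq', by simpa using hs', hnd', ?_, ?_⟩
            · intro w hw
              rcases List.mem_cons.1 hw with rfl | hw
              · exact ⟨List.mem_cons_self, hvg, hvs⟩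
              · rcases hd w hw with ⟨h1', h2', h3'⟩
                exact ⟨List.mem_cons_of_mem _ h1', h2',
                  fun hmem => h3' (List.mem_append_left _ hmem)⟩
            · intro w hw hwg
              rcases List.mem_cons.1 hw with rfl | hw
              · rw [hs']
                exact List.mem_append_left _ (List.mem_append_right _ (List.mem_singleton_self _))
              · exact hcl w hw hwg

-- main invariant lemma for A's BFS loop
lemma bfsLoop_iff (network : List (Int × List Int)) (gw : List Int) (SI : Int) :
    ∀ (fuel : Nat) (q : List Int) (s : PySem.Set Int),
      (∀ u ∈ q, u ∈ s) →
      (∀ u ∈ s, pvReach network gw SI u) →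
      (∀ u ∈ s, u ∈ gw → u = SI) →
      SI ∈ s →
      (∀ u ∈ s, u ∉ q → ∀ v ∈ pvAdj network u, (v ∈ gw → v = SI) ∧ v ∈ s) →
      List.Nodup s →
      (∀ u ∈ s, u ∈ pvPool network SI) →
      q.length + (pvPool network SI).length + 1 ≤ fuel + s.length →
      (bfsLoop network gw fuel q s = true ↔ pvGoal network gw SI) := by
  intro fuel
  induction fuel with
  | zero =>
      intro q s hq hreach hgw hSI hdone hnd hpool hfuel
      exfalso
      have := pvLength_le_pool s (pvPool network SI) hnd hpool
      omega
  | succ n ih =>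
      intro q s hq hreach hgw hSI hdone hnd hpool hfuel
      cases q with
      | nil =>
          simp only [bfsLoop, Bool.false_eq_true, false_iff]
          rintro ⟨u, hru, v, hv, hvg, hvSI⟩
          have hus : u ∈ s := by
            clear hv hvg hvSI
            induction hru with
            | base => exact hSI
            | step hru' hv' hvg' ih' =>
                exact (hdone _ ih' (List.not_mem_nil) _ hv').2
          exact hvSI ((hdone u hus List.not_mem_nil v hv).1 hvg)
      | cons c qt =>
          rcases bfsNbrs_spec gw (pvAdj network c) qt s hnd with ⟨hnone, hsome⟩
          cases hb : bfsNbrs gw (pvAdj network c) qt s with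
          | none =>
              have ⟨v, hvns, hvs, hvg⟩ := hnone.1 hb
              have hstep : bfsLoop network gw (n + 1) (c :: qt) s = true := by
                simp only [bfsLoop]
                rw [show PySem.Dict.getD (PySem.Dict.mk network) c [] = pvAdj network c from rfl, hb]
              rw [hstep]
              simp only [true_iff]
              exact ⟨c, hreach c (hq c List.mem_cons_self), v, hvns, hvg,
                fun h => hvs (h ▸ hSI)⟩
          | some p =>
              obtain ⟨q', s'⟩ := p
              rcases hsome q' s' hb with ⟨d, hq', hs', hnd', hd, hcl⟩
              have hnogw : ∀ v ∈ pvAdj network c, v ∈ gw → v = SI := by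
                intro v hv hvg
                by_cases hvs : v ∈ s
                · exact hgw v hvs hvg
                · exfalso
                  have hcontra := hnone.2 ⟨v, hv, hvs, hvg⟩
                  rw [hb] at hcontra; cases hcontra
              have hds : ∀ v ∈ d, v ∈ s' := by
                intro v hv; rw [hs']; exact List.mem_append_right _ hv
              have step : bfsLoop network gw (n + 1) (c :: qt) s
                  = bfsLoop network gw n q' s' := by
                simp only [bfsLoop]
                rw [show PySem.Dict.getD (PySem.Dict.mk network) c [] = pvAdj network c from rfl, hb]
              rw [step]
              apply ih q' s'
              · intro u hu
                rw [hq'] at hu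
                rcases List.mem_append.1 hu with h | h
                · rw [hs']; exact List.mem_append_left _ (hq u (List.mem_cons_of_mem _ h))
                · exact hds u h
              · intro u hu
                rw [hs'] at hu
                rcases List.mem_append.1 hu with h | h
                · exact hreach u h
                · rcases hd u h with ⟨h1, h2, _⟩
                  exact pvReach.step (hreach c (hq c List.mem_cons_self)) h1 h2
              · intro u hu
                rw [hs'] at hu
                rcases List.mem_append.1 hu with h | h
                · exact hgw u h
                · exact fun hg => absurd hg (hd u h).2.1
              · rw [hs']; exact List.mem_append_left _ hSI
              · intro u hu hnq v hv
                rw [hs'] at hu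
                rcases List.mem_append.1 hu with h | h
                · by_cases huc : u = c
                  · subst huc
                    refine ⟨hnogw v hv, ?_⟩
                    by_cases hvg : v ∈ gw
                    · have := hnogw v hv hvg
                      subst this
                      rw [hs']; exact List.mem_append_left _ hSI
                    · exact hcl v hv hvg
                  · have : u ∉ qt := by
                      intro hmem
                      exact hnq (hq' ▸ List.mem_append_left _ hmem)
                    have := hdone u h (by
                      intro hmem
                      rcases List.mem_cons.1 hmem with rfl | hm
                      · exact huc rfl
                      · exact this hm) v hv
                    exact ⟨this.1, hs' ▸ List.mem_append_left _ this.2⟩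
                · exact absurd (hq' ▸ List.mem_append_right _ h) hnq
              · exact hnd'
              · intro u hu
                rw [hs'] at hu
                rcases List.mem_append.1 hu with h | h
                · exact hpool u h
                · rcases hd u h with ⟨h1, _, _⟩
                  exact List.mem_cons_of_mem _ (pvAdj_mem_flatten network c u h1)
              · have l1 : q'.length = qt.length + d.length := by rw [hq']; simp
                have l2 : s'.length = s.length + d.length := by rw [hs']; simp
                simp only [List.length_cons] at hfuel
                omega

lemma pvPool_length (network : List (Int × List Int)) (SI : Int) :
    (pvPool network SI).length + 1 = pvFuel network := by
  unfold pvPool pvFuel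
  simp only [List.length_cons, List.length_flatten, List.map_map]
  rfl

-- A's result characterised
lemma portA_iff (network : List (Int × List Int)) (SI : Int) (gw : List Int) :
    (SI_can_go_to_exit_gateways network SI gw = true ↔ pvGoal network gw SI) := by
  have hinit : PySem.Set.add PySem.Set.empty SI = [SI] := rfl
  unfold SI_can_go_to_exit_gateways
  rw [hinit]
  apply bfsLoop_iff network gw SI
  · intro u hu; exact hu
  · intro u hu; rcases List.mem_singleton.1 hu with rfl; exact pvReach.base
  · intro u hu; rcases List.mem_singleton.1 hu with rfl; exact fun _ => rfl
  · exact List.mem_singleton_self _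
  · intro u hu hnq; exact absurd hu hnq
  · exact List.nodup_singleton _
  · intro u hu; rcases List.mem_singleton.1 hu with rfl; exact List.mem_cons_self
  · have := pvPool_length network SI
    simp only [List.length_singleton]
    omega

-- spec of B's DFS: either it answers true and the goal holds, or it answers false
-- having saturated the visited set with fully-explored non-gateway nodes
lemma dfsN_spec (network : List (Int × List Int)) (gw : List Int) (SI : Int) :
    ∀ (fuel : Nat) (ns : List Int) (s : PySem.Set Int),
      s.Nodup → SI ∈ s →
      (∀ u ∈ s, pvReach network gw SI u) →
      (∀ u ∈ s, u ∈ gw → u = SI) →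
      (∀ u ∈ s, u ∈ pvPool network SI) →
      (∃ u0, pvReach network gw SI u0 ∧ ∀ v ∈ ns, v ∈ pvAdj network u0) →
      (pvPool network SI).length + 1 ≤ fuel + s.length →
      ((dfsN network gw fuel ns s).1 = true ∧ pvGoal network gw SI) ∨
      (∃ d, dfsN network gw fuel ns s = (false, s ++ d) ∧
        (s ++ d).Nodup ∧ SI ∈ s ++ d ∧
        (∀ u ∈ s ++ d, pvReach network gw SI u) ∧
        (∀ u ∈ s ++ d, u ∈ gw → u = SI) ∧
        (∀ u ∈ s ++ d, u ∈ pvPool network SI) ∧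
        (∀ v ∈ ns, v ∈ gw → v = SI) ∧
        (∀ v ∈ ns, v ∉ gw → v ∈ s ++ d) ∧
        (∀ u ∈ d, ∀ v ∈ pvAdj network u, (v ∈ gw → v = SI) ∧ (v ∉ gw → v ∈ s ++ d))) := by
  intro fuel
  induction fuel with
  | zero =>
      intro ns s hnd hSI hreach hgw hpool hpar hfuel
      exfalso
      have := pvLength_le_pool s (pvPool network SI) hnd hpool
      omega
  | succ n ih =>
      intro ns
      induction ns with
      | nil =>
          intro s hnd hSI hreach hgw hpool hpar hfuel
          right
          exact ⟨[], by simp [dfsN], by simpa using hnd, by simpa using hSI,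
            by simpa using hreach, by simpa using hgw, by simpa using hpool,
            by simp, by simp, by simp⟩
      | cons v rest ihns =>
          intro s hnd hSI hreach hgw hpool hpar hfuel
          rcases hpar with ⟨u0, hu0, hadj⟩
          have hpar' : ∃ u0, pvReach network gw SI u0 ∧ ∀ w ∈ rest, w ∈ pvAdj network u0 :=
            ⟨u0, hu0, fun w hw => hadj w (List.mem_cons_of_mem _ hw)⟩
          by_cases hvs : v ∈ s
          · have hc : PySem.Set.contains s v = true := (PySem.Set.contains_iff _ _).2 hvs
            have heq : dfsN network gw (n + 1) (v :: rest) s = dfsN network gw (n + 1) rest s := by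
              simp only [dfsN, hc, if_true]
            rw [heq]
            rcases ihns s hnd hSI hreach hgw hpool hpar' hfuel with h | ⟨d, hres, hp⟩
            · exact Or.inl h
            · right
              refine ⟨d, hres, hp.1, hp.2.1, hp.2.2.1, hp.2.2.2.1, hp.2.2.2.2.1, ?_, ?_, hp.2.2.2.2.2.2.2⟩
              · intro w hw
                rcases List.mem_cons.1 hw with rfl | hw
                · exact hgw w hvs
                · exact hp.2.2.2.2.2.1 w hw
              · intro w hw hwg
                rcases List.mem_cons.1 hw with rfl | hw
                · exact List.mem_append_left _ hvs
                · exact hp.2.2.2.2.2.2.1 w hw hwg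
          · have hc : PySem.Set.contains s v = false := by
              rw [Bool.eq_false_iff]
              intro hcc; exact hvs ((PySem.Set.contains_iff _ _).1 hcc)
            by_cases hvg : v ∈ gw
            · have hcg : gw.contains v = true := List.contains_iff_mem.2 hvg
              have heq : dfsN network gw (n + 1) (v :: rest) s = (true, s) := by
                simp only [dfsN, hc, hcg, Bool.false_eq_true, if_false, if_true]
              left
              refine ⟨by rw [heq], u0, hu0, v, hadj v List.mem_cons_self, hvg, ?_⟩
              intro h; exact hvs (h ▸ hSI)
            · have hcg : gw.contains v = false := by
                rw [Bool.eq_false_iff]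
                intro hcc; exact hvg (List.contains_iff_mem.1 hcc)
              have hvr : pvReach network gw SI v :=
                pvReach.step hu0 (hadj v List.mem_cons_self) hvg
              have hadd : PySem.Set.add s v = s ++ [v] := PySem.Set.add_of_not_mem hvs
              have heq : dfsN network gw (n + 1) (v :: rest) s
                  = match dfsN network gw n (pvAdj network v) (s ++ [v]) with
                    | (true, t) => (true, t)
                    | (false, t) => dfsN network gw (n + 1) rest t := by
                simp only [dfsN, hc, hcg, Bool.false_eq_true, if_false]
                rw [hadd]
                rfl
              have hnd1 : (s ++ [v]).Nodup :=
                hnd.append (List.nodup_singleton _)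
                  (fun a ha hav => hvs ((List.mem_singleton.1 hav) ▸ ha))
              have hrec := ih (pvAdj network v) (s ++ [v]) hnd1
                (List.mem_append_left _ hSI)
                (by intro u hu
                    rcases List.mem_append.1 hu with h | h
                    · exact hreach u h
                    · rcases List.mem_singleton.1 h with rfl; exact hvr)
                (by intro u hu
                    rcases List.mem_append.1 hu with h | h
                    · exact hgw u h
                    · rcases List.mem_singleton.1 h with rfl
                      exact fun hg => absurd hg hvg)
                (by intro u hu
                    rcases List.mem_append.1 hu with h | h
                    · exact hpool u h
                    · rcases List.mem_singleton.1 h with rfl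
                      exact List.mem_cons_of_mem _
                        (pvAdj_mem_flatten network u0 u (hadj u List.mem_cons_self)))
                ⟨v, hvr, fun w hw => hw⟩
                (by simp only [List.length_append, List.length_singleton]; omega)
              cases hb : dfsN network gw n (pvAdj network v) (s ++ [v]) with
              | mk b t =>
                cases b with
                | true =>
                    left
                    constructor
                    · rw [heq, hb]
                    · rcases hrec with ⟨_, hgoal⟩ | ⟨d, hres, _⟩
                      · exact hgoal
                      · rw [hb] at hres; cases hres
                | false =>
                    rcases hrec with ⟨htrue, _⟩ | ⟨d1, hres1, hnd1', hSI1, hreach1, hgw1, hpool1, hns1a, hns1b, hdone1⟩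
                    · rw [hb] at htrue; cases htrue
                    · rw [hb] at hres1
                      have ht : t = (s ++ [v]) ++ d1 := congrArg Prod.snd hres1
                      subst ht
                      have hlen : ((s ++ [v]) ++ d1).length = s.length + 1 + d1.length := by
                        simp only [List.length_append, List.length_singleton]
                      rcases ihns ((s ++ [v]) ++ d1) hnd1' hSI1 hreach1 hgw1 hpool1
                          (⟨u0, hu0, fun w hw => hadj w (List.mem_cons_of_mem _ hw)⟩)
                          (by omega) with h2 | ⟨d2, hres2, hnd2, hSI2, hreach2, hgw2, hpool2, hns2a, hns2b, hdone2⟩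
                      · left
                        constructor
                        · rw [heq, hb]
                          exact h2.1
                        · exact h2.2
                      · right
                        refine ⟨[v] ++ d1 ++ d2, ?_, ?_, ?_, ?_, ?_, ?_, ?_, ?_, ?_⟩
                        · rw [heq, hb]
                          show dfsN network gw (n + 1) rest (s ++ [v] ++ d1)
                              = (false, s ++ ([v] ++ d1 ++ d2))
                          rw [hres2]
                          simp [List.append_assoc]
                        · simpa [List.append_assoc] using hnd2
                        · simpa [List.append_assoc] using hSI2
                        · intro u hu; exact hreach2 u (by simpa [List.append_assoc] using hu)
                        · intro u hu; exact hgw2 u (by simpa [List.append_assoc] using hu)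
                        · intro u hu; exact hpool2 u (by simpa [List.append_assoc] using hu)
                        · intro w hw
                          rcases List.mem_cons.1 hw with rfl | hw
                          · exact fun hg => absurd hg hvg
                          · exact hns2a w hw
                        · intro w hw hwg
                          rcases List.mem_cons.1 hw with rfl | hw
                          · simp
                          · have := hns2b w hw hwg
                            simpa [List.append_assoc] using this
                        · intro u hu w hw
                          rcases List.mem_append.1 hu with hu | hu
                          · rcases List.mem_append.1 hu with hu | hu
                            · rcases List.mem_singleton.1 hu with rfl
                              -- u = v: its whole adjacency list was processed by the descent
                              refine ⟨hns1a w hw, fun hwg => ?_⟩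
                              have := hns1b w hw hwg
                              simpa [List.append_assoc] using
                                (List.mem_append_left d2 this)
                            · -- u ∈ d1: done by the descent's post
                              have := hdone1 u hu w hw
                              refine ⟨this.1, fun hwg => ?_⟩
                              have h' := this.2 hwg
                              simpa [List.append_assoc] using
                                (List.mem_append_left d2 h')
                          · -- u ∈ d2: done by the tail's post
                            have := hdone2 u hu w hw
                            refine ⟨this.1, fun hwg => ?_⟩
                            simpa [List.append_assoc] using this.2 hwg

-- B's result characterised
lemma portB_iff (network : List (Int × List Int)) (SI : Int) (gw : List Int) :
    (SI_can_go_to_exit_gateways_alt network SI gw = true ↔ pvGoal network gw SI) := by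
  have hinit : PySem.Set.add PySem.Set.empty SI = [SI] := rfl
  unfold SI_can_go_to_exit_gateways_alt
  rw [hinit,
    show PySem.Dict.getD (PySem.Dict.mk network) SI [] = pvAdj network SI from rfl]
  have hrec := dfsN_spec network gw SI (pvFuel network) (pvAdj network SI) [SI]
    (List.nodup_singleton _) (List.mem_singleton_self _)
    (by intro u hu; rcases List.mem_singleton.1 hu with rfl; exact pvReach.base)
    (by intro u hu; rcases List.mem_singleton.1 hu with rfl; exact fun _ => rfl)
    (by intro u hu; rcases List.mem_singleton.1 hu with rfl; exact List.mem_cons_self)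
    ⟨SI, pvReach.base, fun w hw => hw⟩
    (by have := pvPool_length network SI; simp only [List.length_singleton]; omega)
  rcases hrec with ⟨htrue, hgoal⟩ | ⟨d, hres, _, _, _, hgw', _, hnsa, hnsb, hdone⟩
  · rw [htrue]
    exact ⟨fun _ => hgoal, fun _ => rfl⟩
  · rw [hres]
    simp only [Bool.false_eq_true, false_iff]
    rintro ⟨u, hru, w, hw, hwg, hwSI⟩
    have hclosed : ∀ x, pvReach network gw SI x → x ∈ [SI] ++ d := by
      intro x hx
      induction hx with
      | base => exact List.mem_append_left _ (List.mem_singleton_self _)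
      | step hru' hv' hvg' ihx =>
          rcases List.mem_append.1 ihx with h | h
          · rcases List.mem_singleton.1 h with rfl
            exact hnsb _ hv' hvg'
          · exact (hdone _ h _ hv').2 hvg'
    rcases List.mem_append.1 (hclosed u hru) with h | h
    · rcases List.mem_singleton.1 h with rfl
      exact hwSI (hnsa w hw hwg)
    · exact hwSI ((hdone u h w hw).1 hwg)

-- ===== VERDICT (by name: the statement is the Claim_ definition above) =====
theorem SI_can_go_to_exit_gateways_spec : Claim_equal_SI_can_go_to_exit_gateways := by
  intro network SI gw _ _
  unfold Spec_SI_can_go_to_exit_gateways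
  exact Bool.coe_iff_coe.mp ((portA_iff network SI gw).trans (portB_iff network SI gw).symm)
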